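-- pv_equiv track=rewrite | github.com/rushiagr/basic-algos | interview/024-flip-game.py | all_combinations
-- ===== SOURCE A (Python) =====
-- def all_combinations(s):
--     res = []
--     for i in range(len(s)-1):
--         if s[i] == '+' and s[i] == s[i+1]:
--             new = list(s)
--             new[i] = new[i+1] = '-'
--             res.append(''.join(new))
--     return res
-- ===== SOURCE B (Python) =====
-- def all_combinations(s):
--     # run-based: find each maximal run of '+' and emit one flip per adjacent pair in the run
--     res = []
--     n = len(s)
--     start = 0
--     while start < n:
--         if s[start] != '+':
--             start += 1
--             continue
--         end = start
--         while end < n and s[end] == '+':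
--             end += 1
--         for i in range(start, end - 1):
--             res.append(s[:i] + '--' + s[i + 2:])
--         start = end
--     return res
-- ===== Notes on version B (the rewrite author's own statement) =====
-- stated objective: alternative
-- what changed: B replaces A's per-index pair test (copy list, mutate two cells, join, for every position) by a run-based algorithm: it locates each maximal run of '+' characters and emits one sliced flip per adjacent pair inside the run, skipping non-'+' stretches without pair tests.
import Mathlib
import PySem

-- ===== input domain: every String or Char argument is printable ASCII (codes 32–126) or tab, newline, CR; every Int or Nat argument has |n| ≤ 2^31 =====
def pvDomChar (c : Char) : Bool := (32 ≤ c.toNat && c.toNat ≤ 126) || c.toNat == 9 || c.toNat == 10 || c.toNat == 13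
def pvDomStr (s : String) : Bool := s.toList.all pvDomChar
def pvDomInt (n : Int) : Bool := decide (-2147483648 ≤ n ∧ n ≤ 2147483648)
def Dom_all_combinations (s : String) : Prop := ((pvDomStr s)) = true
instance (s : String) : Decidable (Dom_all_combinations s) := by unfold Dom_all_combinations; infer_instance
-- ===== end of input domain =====

-- B replaces A's per-index pair test by a run-based algorithm: it locates each maximal
-- run of '+' and emits one sliced flip per adjacent pair inside the run (objective: alternative).


-- ===== PORT A =====
-- for i in range(len(s)-1): if s[i]=='+' and s[i]==s[i+1]: new = list(s); new[i]=new[i+1]='-'; res.append(''.join(new))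
def all_combinations (s : String) : List String :=
  (PySem.List.pyRange 0 (PySem.Str.len s - 1) 1).foldl
    (fun res i =>
      if PySem.List.pyGetD s.toList i ' ' = '+' ∧
         PySem.List.pyGetD s.toList i ' ' = PySem.List.pyGetD s.toList (i + 1) ' '
      then res ++ [String.ofList
             (PySem.List.pySetD (PySem.List.pySetD s.toList i '-') (i + 1) '-')]
      else res)
    []

-- ===== PORT B =====
-- res.append(s[:i] + '--' + s[i+2:])
def pvFlipAt (cs : List Char) (i : Int) : String :=
  String.ofList (PySem.Chars.slice cs none (some i) ++
    '-' :: '-' :: PySem.Chars.slice cs (some (i + 2)) none)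

-- inner while: while end < n and s[end] == '+': end += 1   (fuel only makes it total)
def pvRunEnd (cs : List Char) : Nat → Nat → Nat
  | 0, e => e
  | fuel + 1, e =>
    if e < cs.length ∧ PySem.List.pyGetD cs (e : Int) ' ' = '+' then
      pvRunEnd cs fuel (e + 1)
    else e

-- outer while over run starts; per run: for i in range(start, end-1): append flip
def pvRuns (cs : List Char) : Nat → Nat → List String
  | 0, _ => []
  | fuel + 1, start =>
    if start < cs.length then
      if PySem.List.pyGetD cs (start : Int) ' ' = '+' then
        let e := pvRunEnd cs (cs.length - start) start
        ((PySem.List.pyRange (start : Int) ((e : Int) - 1) 1).foldl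
            (fun r i => r ++ [pvFlipAt cs i]) []) ++ pvRuns cs fuel e
      else pvRuns cs fuel (start + 1)
    else []

def all_combinations_alt (s : String) : List String :=
  pvRuns s.toList (s.toList.length + 1) 0

-- ===== PRECONDITION & SPEC =====
def Spec_all_combinations (s : String) (out : List String) : Prop := out = all_combinations_alt s
instance (s : String) (out : List String) : Decidable (Spec_all_combinations s out) := by unfold Spec_all_combinations; infer_instance

-- ===== CLAIM (what is proved, stated in full; the proofs are below) =====
def Claim_equal_all_combinations : Prop := ∀ (s : String), Dom_all_combinations s → Spec_all_combinations s (all_combinations s)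

-- ===== LEMMAS AND PROOFS =====

-- the flip at position i, in take/drop form
def pvNatFlip (cs : List Char) (i : Nat) : String :=
  String.ofList (cs.take i ++ '-' :: '-' :: cs.drop (i + 2))

-- the double in-place assignment new[i] = new[i+1] = '-' equals the take/drop decomposition
theorem set_set_eq_take_cons_drop (k : Nat) : ∀ (cs : List Char), k + 1 < cs.length →
    (cs.set k '-').set (k+1) '-' = cs.take k ++ '-' :: '-' :: cs.drop (k+2) := by
  induction k with
  | zero =>
    intro cs h
    match cs, h with
    | a :: b :: t, _ => simp
  | succ k ih =>
    intro cs h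
    match cs, h with
    | a :: t, h =>
      simp only [List.set_cons_succ, List.take_succ_cons, List.drop_succ_cons, List.cons_append]
      rw [ih t (by simpa using h)]

-- A's pairwise character test is "'++' starts at position k"
theorem pair_test_iff_prefix (k : Nat) (d : Char) : ∀ (cs : List Char), k + 1 < cs.length →
    ((['+','+'] <+: cs.drop k) ↔ (cs.getD k d = '+' ∧ cs.getD (k+1) d = '+')) := by
  induction k with
  | zero =>
    intro cs h
    match cs, h with
    | a :: b :: t, _ => simp [List.cons_prefix_cons, eq_comm]
  | succ k ih =>
    intro cs h
    match cs, h with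
    | a :: t, h =>
      simp only [List.drop_succ_cons, List.getD_cons_succ]
      exact ih t (by simpa using h)

-- a '++' prefix of cs.drop i forces i+1 < cs.length
theorem prefix_lt (cs : List Char) (i : Nat) (h : ['+','+'] <+: cs.drop i) :
    i + 1 < cs.length := by
  have := h.length_le
  simp only [List.length_drop, List.length_cons, List.length_nil] at this
  omega

-- A collects, in index order, the flip of every position where '++' starts
theorem all_combinations_A_eq (s : String) :
    all_combinations s =
      ((List.range (s.toList.length - 1)).filter
          (fun i => decide (['+', '+'] <+: s.toList.drop i))).map (pvNatFlip s.toList) := by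
  unfold all_combinations
  simp only [PySem.Str.len_eq]
  rw [PySem.List.pyRange_one]
  have hc : (((s.toList.length : Int) - 1) - 0).toNat = s.toList.length - 1 := by omega
  rw [hc, List.foldl_map]
  have hcong := PySem.List.foldl_congr_mem
    (l := List.range (s.toList.length - 1)) (init := ([] : List String))
    (f := fun x y =>
        if PySem.List.pyGetD s.toList (0 + (y:Int)) ' ' = '+' ∧
           PySem.List.pyGetD s.toList (0 + (y:Int)) ' ' = PySem.List.pyGetD s.toList (0 + (y:Int) + 1) ' '
        then x ++ [String.ofList (PySem.List.pySetD (PySem.List.pySetD s.toList (0 + (y:Int)) '-') (0 + (y:Int) + 1) '-')]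
        else x)
    (g := fun res k => if decide (['+','+'] <+: s.toList.drop k) then
            res ++ [pvNatFlip s.toList k] else res)
    ?_
  · rw [hcong, PySem.List.foldl_append_if]
    simp
  · intro acc k hk
    simp only [List.mem_range] at hk
    have hk1 : k + 1 < s.toList.length := by omega
    simp only [zero_add, ← Nat.cast_add_one, PySem.List.pyGetD_natCast, PySem.List.pySetD_natCast]
    unfold pvNatFlip
    rw [set_set_eq_take_cons_drop k s.toList hk1]
    apply if_congr _ rfl rfl
    rw [decide_eq_true_eq, pair_test_iff_prefix k ' ' s.toList hk1]
    constructor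
    · rintro ⟨h1, h2⟩; exact ⟨h1, h2 ▸ h1⟩
    · rintro ⟨h1, h2⟩; exact ⟨h1, h1.trans h2.symm⟩

-- the sliced flip equals the take/drop flip at a natural index
theorem pvFlipAt_natCast (cs : List Char) (i : Nat) :
    pvFlipAt cs (i : Int) = pvNatFlip cs i := by
  unfold pvFlipAt pvNatFlip PySem.Chars.slice
  rw [PySem.List.slice_to cs (by positivity), PySem.List.slice_from cs (by positivity)]
  have h1 : ((i : Int)).toNat = i := by omega
  have h2 : ((i : Int) + 2).toNat = i + 2 := by omega
  rw [h1, h2]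

-- the per-run emission loop is a map over the run's pair positions
theorem foldl_flip_eq_map (cs : List Char) (a b : Nat) :
    (PySem.List.pyRange (a : Int) (b : Int) 1).foldl (fun r i => r ++ [pvFlipAt cs i]) []
      = (List.range' a (b - a)).map (pvNatFlip cs) := by
  rw [PySem.List.pyRange_one, List.foldl_map, PySem.List.foldl_append_singleton_eq_map]
  have hc : (((b : Nat) : Int) - (a : Nat)).toNat = b - a := by omega
  rw [hc, List.range'_eq_map_range, List.map_map]
  simp only [List.nil_append]
  apply List.map_congr_left
  intro k _
  have : (a : Int) + (k : Nat) = ((a + k : Nat) : Int) := by push_cast; ring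
  simp only [Function.comp, this, pvFlipAt_natCast]

-- inner while: pvRunEnd returns the end of the maximal '+'-run from e
theorem pvRunEnd_spec (cs : List Char) : ∀ (fuel e : Nat), cs.length - e ≤ fuel →
    e ≤ pvRunEnd cs fuel e ∧
    (∀ j, e ≤ j → j < pvRunEnd cs fuel e → j < cs.length ∧ cs.getD j ' ' = '+') ∧
    ¬(pvRunEnd cs fuel e < cs.length ∧ cs.getD (pvRunEnd cs fuel e) ' ' = '+') := by
  intro fuel
  induction fuel with
  | zero =>
    intro e h
    simp only [pvRunEnd]
    exact ⟨le_refl _, fun j h1 h2 => absurd h2 (by omega), by omega⟩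
  | succ fuel ih =>
    intro e h
    simp only [pvRunEnd, PySem.List.pyGetD_natCast]
    by_cases hc : e < cs.length ∧ cs.getD e ' ' = '+'
    · rw [if_pos hc]
      obtain ⟨h1, h2, h3⟩ := ih (e + 1) (by omega)
      refine ⟨by omega, ?_, h3⟩
      intro j hj1 hj2
      rcases Nat.eq_or_lt_of_le hj1 with rfl | hlt
      · exact hc
      · exact h2 j hlt hj2
    · rw [if_neg hc]
      exact ⟨le_refl _, fun j h1 h2 => absurd h2 (by omega), hc⟩

-- outer while: runs from start collect, in order, the flips at every pair position ≥ start
theorem pvRuns_eq (cs : List Char) : ∀ (fuel start : Nat), cs.length + 1 - start ≤ fuel →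
    pvRuns cs fuel start =
      ((List.range' start (cs.length - 1 - start)).filter
          (fun i => decide (['+','+'] <+: cs.drop i))).map (pvNatFlip cs) := by
  intro fuel
  induction fuel with
  | zero =>
    intro start h
    have : cs.length - 1 - start = 0 := by omega
    simp [pvRuns, this]
  | succ fuel ih =>
    intro start h
    simp only [pvRuns, PySem.List.pyGetD_natCast]
    by_cases hs : start < cs.length
    · rw [if_pos hs]
      by_cases hp : cs.getD start ' ' = '+'
      · rw [if_pos hp]
        obtain ⟨he1, he2, he3⟩ := pvRunEnd_spec cs (cs.length - start) start (le_refl _)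
        set e := pvRunEnd cs (cs.length - start) start with hedef
        have hne : start < e := by
          rcases Nat.eq_or_lt_of_le he1 with heq | hlt
          · exact absurd ⟨heq ▸ hs, heq ▸ hp⟩ he3
          · exact hlt
        have helen : e ≤ cs.length := by
          by_contra hgt
          exact absurd (he2 cs.length (by omega) (by omega)).1 (by omega)
        have hrun : ∀ j, start ≤ j → j < e → cs.getD j ' ' = '+' := fun j a b => (he2 j a b).2
        have hcast : ((e : Int) - 1) = ((e - 1 : Nat) : Int) := by omega
        rw [hcast, foldl_flip_eq_map cs start (e - 1), ih e (by omega)]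
        -- the pair positions in [start, e-1) all pass the filter
        have hall : ∀ i ∈ List.range' start (e - 1 - start),
            decide (['+','+'] <+: cs.drop i) = true := by
          intro i hi
          simp only [List.mem_range'_1] at hi
          have hi1 : i + 1 < cs.length := by omega
          rw [decide_eq_true_eq, pair_test_iff_prefix i ' ' cs hi1]
          exact ⟨hrun i hi.1 (by omega), hrun (i+1) (by omega) (by omega)⟩
        rcases Nat.eq_or_lt_of_le helen with heq | hlt
        · -- run reaches the end of the string
          have h0 : cs.length - 1 - e = 0 := by omega
          have h1 : cs.length - 1 - start = e - 1 - start := by omega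
          rw [h0, h1]
          simp only [List.range'_zero, List.filter_nil, List.map_nil, List.append_nil]
          rw [List.filter_eq_self.mpr hall]
        · -- run ends before the end: position e-1 fails, positions ≥ e recurse
          have hsplit : cs.length - 1 - start = (e - 1 - start) + (cs.length - e) := by omega
          rw [hsplit, ← List.range'_append]
          have h2 : start + 1 * (e - 1 - start) = e - 1 := by omega
          rw [h2]
          have h3 : cs.length - e = (cs.length - 1 - e) + 1 := by omega
          rw [h3, List.range'_succ]
          have hfail : decide (['+','+'] <+: cs.drop (e - 1)) = false := by
            rw [decide_eq_false_iff_not, pair_test_iff_prefix (e-1) ' ' cs (by omega)]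
            rintro ⟨-, hgd⟩
            have : e - 1 + 1 = e := by omega
            rw [this] at hgd
            exact he3 ⟨hlt, hgd⟩
          have h4 : e - 1 + 1 = e := by omega
          rw [List.filter_append, List.filter_cons_of_neg (by simpa using hfail),
              List.filter_eq_self.mpr hall, h4, List.map_append]
      · rw [if_neg hp, ih (start + 1) (by omega)]
        rcases Nat.eq_or_lt_of_le (by omega : start + 1 ≤ cs.length) with heq | hlt
        · have h0 : cs.length - 1 - start = 0 := by omega
          have h1 : cs.length - 1 - (start + 1) = 0 := by omega
          rw [h0, h1]; simp
        · have h0 : cs.length - 1 - start = (cs.length - 1 - (start + 1)) + 1 := by omega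
          rw [h0, List.range'_succ, List.filter_cons_of_neg]
          simp only [decide_eq_true_eq]
          intro hpre
          have h1 : start + 1 < cs.length := prefix_lt cs start hpre
          exact hp ((pair_test_iff_prefix start ' ' cs h1).mp hpre).1
    · rw [if_neg hs]
      have : cs.length - 1 - start = 0 := by omega
      simp [this]

-- ===== VERDICT (by name: the statement is the Claim_ definition above) =====
theorem all_combinations_spec : Claim_equal_all_combinations := by
  intro s _
  unfold Spec_all_combinations all_combinations_alt
  rw [all_combinations_A_eq, pvRuns_eq s.toList (s.toList.length + 1) 0 (by omega)]
  simp [List.range_eq_range']
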